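-- pv_equiv track=rewrite | github.com/hermans-family/stats-calculator | statcalc.py | calculate_hp
-- ===== SOURCE A (Python) =====
-- def calculate_vig_hp(stat_value):
--     """
--     This is a function.  It takes in a parameter called stat_value and outputs its contribution to
--     HP.  This function only calculates the contributions from the Vigor attribute.  HP scales with vigor
--     differently than the other attributes.
--
--     At 0 Vigor, players have 500 max HP
--     From level 0 to 20, Vigor raises max HP by 30 points per attribute point
--     From level 21 to 50, Vigor raises max HP by 20 points per attribute point
--     From level 51 to 99, Vigor raises max HP by 5 points per attribute point
--     """
--
--     # If the stat_value is greater than or equal to 51, use the calculations from this part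
--     if stat_value >= 51:
--         levels_51_to_99 = stat_value - 50
--         levels_21_to_50 = 30  # Why is this 30?
--         levels_0_to_20 = 20  # Why is this 20?
--     # If the stat value is less than or equal to 50 and greater than or equal to 21, use these numbers
--     elif 21 <= stat_value <= 50:
--         levels_51_to_99 = 0  # Why is this 0?
--         levels_21_to_50 = stat_value - 20
--         levels_0_to_20 = 20
--     # If the stat value is not greater than or equal to 51 or between 21 and 51.
--     else:
--         levels_51_to_99 = 0
--         levels_21_to_50 = 0
--         levels_0_to_20 = stat_value
--
--     # This calculates the amount of hp_from_vig. There is 500 base HP, plus the results from each level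
--     hp_from_vig = 500 + levels_0_to_20 * 30 + levels_21_to_50 * 20 + levels_51_to_99 * 5
--
--     # Finally, we return the value of the calculation
--     return hp_from_vig
--
-- def calculate_other_hp(stat_value):
--     """
--     This function needs to calculate stat values for attributes other than vigor.  It should look a lot like the
--     one for vigor, but should have different contributions.
--
--     From level 0 to 20, any stat besides Vigor raises max HP by 2 points per attribute point
--     From level 21 to 50, any stat besides Vigor raises max HP by 1 point per attribute point
--     From level 51 to 99, any stat besides Vigor raises max HP by 0 points per attribute point
--     """
--     return 0
--
-- def calculate_hp(attributes):
--     """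
--     This is a function that takes in the attributes and calculates the HP.
--     """
--     hp = 0  # HP starts out at zero and we add to it
--
--     for stat_name, stat_value in attributes.items():
--         if stat_value > 99:
--             # This is checking to
--             raise Exception('Value for stat %s is %s.  Maximum value for stat is 99.' % (stat_name, stat_value))
--         elif stat_value < 0:
--             raise Exception('Value for stat %s is %s. Stats cannot be negative!' % (stat_name, stat_value))
--
--         # If the stat is vigor, use the special vigor calculation function.
--         if stat_name == 'vig':
--
--             vig_hp = calculate_vig_hp(stat_value)
--
--             #  This is short for hp = hp + vig_hp. Programmers are lazy.
--             hp += vig_hp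
--         else:
--             other_hp = calculate_other_hp(stat_value)
--
--             # This is short for hp = hp + other_hp.  See statement above.
--             hp += other_hp
--
--     return hp
-- ===== SOURCE B (Python) =====
-- def calculate_hp(attributes):
--     # One validation pass (same exceptions, same order as A), then HP is built
--     # point by point: each vigor point contributes a per-level gain from a table.
--     for stat_name, stat_value in attributes.items():
--         if stat_value > 99:
--             raise Exception('Value for stat %s is %s.  Maximum value for stat is 99.' % (stat_name, stat_value))
--         elif stat_value < 0:
--             raise Exception('Value for stat %s is %s. Stats cannot be negative!' % (stat_name, stat_value))
--     if 'vig' not in attributes: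
--         return 0
--     hp = 500
--     for level in range(1, attributes['vig'] + 1):
--         hp += 30 if level <= 20 else 20 if level <= 50 else 5
--     return hp
-- ===== Notes on version B (the rewrite author's own statement) =====
-- stated objective: alternative
-- what changed: Replaces A's helper-dispatch accumulating loop over stats and its tier-count cascade by one validation scan followed by a per-point accumulation: HP starts at 500 and each vigor level 1..v adds its own marginal gain (30/20/5) via a range loop.
import Mathlib
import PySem

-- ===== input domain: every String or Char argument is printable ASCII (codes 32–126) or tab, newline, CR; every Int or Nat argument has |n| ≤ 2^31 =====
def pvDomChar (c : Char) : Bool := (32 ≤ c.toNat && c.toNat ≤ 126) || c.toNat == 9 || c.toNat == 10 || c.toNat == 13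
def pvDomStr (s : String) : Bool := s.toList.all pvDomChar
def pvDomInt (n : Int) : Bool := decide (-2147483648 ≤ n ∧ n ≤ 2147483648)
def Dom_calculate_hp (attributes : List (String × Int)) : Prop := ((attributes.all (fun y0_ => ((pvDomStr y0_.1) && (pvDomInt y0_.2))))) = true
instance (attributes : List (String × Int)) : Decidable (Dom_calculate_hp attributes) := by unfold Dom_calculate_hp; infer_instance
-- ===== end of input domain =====

-- B replaces A's helper-dispatch loop and tier-count cascade by a validation scan plus a
-- per-point accumulation over the vigor levels (objective: alternative decomposition).

-- ===== PORT A =====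
def calculate_vig_hp (stat_value : Int) : Int :=
  let (levels_51_to_99, levels_21_to_50, levels_0_to_20) :=
    if stat_value ≥ 51 then (stat_value - 50, (30 : Int), (20 : Int))
    else if 21 ≤ stat_value ∧ stat_value ≤ 50 then ((0 : Int), stat_value - 20, (20 : Int))
    else ((0 : Int), (0 : Int), stat_value)
  500 + levels_0_to_20 * 30 + levels_21_to_50 * 20 + levels_51_to_99 * 5

def calculate_other_hp (_stat_value : Int) : Int := 0

-- the for-loop; 'none' = the raise branches (excluded by Pre_)
def hpLoop : Int → List (String × Int) → Option Int
  | hp, [] => some hp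
  | hp, (stat_name, stat_value) :: rest =>
    if stat_value > 99 then none
    else if stat_value < 0 then none
    else if stat_name == "vig" then hpLoop (hp + calculate_vig_hp stat_value) rest
    else hpLoop (hp + calculate_other_hp stat_value) rest

def calculate_hp (attributes : List (String × Int)) : Int :=
  (hpLoop 0 attributes).getD 0

-- ===== PORT B =====
-- validation pass; 'false' = the raise branches (excluded by Pre_)
def altValidate : List (String × Int) → Bool
  | [] => true
  | (_, stat_value) :: rest =>
    if stat_value > 99 then false
    else if stat_value < 0 then false
    else altValidate rest

-- '30 if level <= 20 else 20 if level <= 50 else 5'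
def vigPointGain (level : Int) : Int :=
  if level ≤ 20 then 30 else if level ≤ 50 then 20 else 5

def calculate_hp_alt (attributes : List (String × Int)) : Int :=
  if altValidate attributes then
    match PySem.Dict.get? ⟨attributes⟩ "vig" with
    | none => 0
    | some v => (PySem.List.pyRange 1 (v + 1) 1).foldl (fun hp level => hp + vigPointGain level) 500
  else 0

-- ===== PRECONDITION & SPEC =====
-- Pre_ excludes (a) association lists with duplicate keys, which do not represent a Python dict
-- (the argument is a dict), and (b) any stat value > 99 or < 0, on which A raises an Exception.
def Pre_calculate_hp (attributes : List (String × Int)) : Prop :=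
  (attributes.map Prod.fst).Nodup ∧ ∀ p ∈ attributes, 0 ≤ p.2 ∧ p.2 ≤ 99
instance (attributes : List (String × Int)) : Decidable (Pre_calculate_hp attributes) := by
  unfold Pre_calculate_hp; infer_instance
def pvWitness_calculate_hp : (List (String × Int)) := [("vig", 25), ("str", 10)]

def Spec_calculate_hp (attributes : List (String × Int)) (out : Int) : Prop := out = calculate_hp_alt attributes
instance (attributes : List (String × Int)) (out : Int) : Decidable (Spec_calculate_hp attributes out) := by unfold Spec_calculate_hp; infer_instance

-- ===== CLAIM (what is proved, stated in full; the proofs are below) =====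
def Claim_equal_calculate_hp : Prop := ∀ (attributes : List (String × Int)), Dom_calculate_hp attributes → Pre_calculate_hp attributes → Spec_calculate_hp attributes (calculate_hp attributes)

-- ===== LEMMAS AND PROOFS =====

-- B's per-point accumulation from any start value, one level appended at the end
theorem vigSum_succ (v : Int) (h : 0 ≤ v) :
    (PySem.List.pyRange 1 (v + 1 + 1) 1).foldl (fun hp level => hp + vigPointGain level) 500
      = (PySem.List.pyRange 1 (v + 1) 1).foldl (fun hp level => hp + vigPointGain level) 500
        + vigPointGain (v + 1) := by
  rw [show (v + 1 + 1) = (v + 1) + 1 from rfl,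
    PySem.List.pyRange_one_succ_right (by omega : (1:Int) ≤ v + 1)]
  simp [List.foldl_append]

-- the per-point accumulation agrees with A's vigor cascade on non-negative values
theorem vig_sum_eq (v : Int) (h : 0 ≤ v) :
    (PySem.List.pyRange 1 (v + 1) 1).foldl (fun hp level => hp + vigPointGain level) 500
      = calculate_vig_hp v := by
  induction v using Int.induction_on with
  | zero => decide
  | succ n ih =>
    have hn : (0:Int) ≤ (n:Int) := by positivity
    rw [vigSum_succ _ hn, ih hn]
    unfold calculate_vig_hp vigPointGain
    split_ifs <;> simp_all <;> omega
  | pred n _ => omega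

theorem altValidate_true (attrs : List (String × Int))
    (hval : ∀ p ∈ attrs, 0 ≤ p.2 ∧ p.2 ≤ 99) : altValidate attrs = true := by
  induction attrs with
  | nil => rfl
  | cons p rest ih =>
    obtain ⟨a, v⟩ := p
    have hv := hval _ (List.mem_cons_self ..)
    simp only [altValidate]
    rw [if_neg (by omega), if_neg (by omega)]
    exact ih fun q hq => hval q (List.mem_cons_of_mem _ hq)

theorem hpLoop_no_vig (attrs : List (String × Int)) (hp : Int)
    (hval : ∀ p ∈ attrs, 0 ≤ p.2 ∧ p.2 ≤ 99)
    (hnv : "vig" ∉ attrs.map Prod.fst) : hpLoop hp attrs = some hp := by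
  induction attrs generalizing hp with
  | nil => rfl
  | cons p rest ih =>
    obtain ⟨a, v⟩ := p
    have hv := hval _ (List.mem_cons_self ..)
    simp only [hpLoop]
    rw [if_neg (by omega), if_neg (by omega)]
    have hne : (a == "vig") = false := by
      simp only [List.map_cons, List.mem_cons] at hnv
      simp only [beq_eq_false_iff_ne, ne_eq]; intro h; exact hnv (Or.inl h.symm)
    rw [hne]
    simp only [Bool.false_eq_true, if_false, calculate_other_hp, add_zero]
    exact ih hp (fun q hq => hval q (List.mem_cons_of_mem _ hq))
      (fun h => hnv (by simpa using Or.inr (by simpa using h)))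

theorem hpLoop_eq (attrs : List (String × Int)) (hp : Int)
    (hval : ∀ p ∈ attrs, 0 ≤ p.2 ∧ p.2 ≤ 99)
    (hnd : (attrs.map Prod.fst).Nodup) :
    hpLoop hp attrs = some (hp +
      match (PySem.Dict.mk attrs).get? "vig" with
      | none => 0
      | some v => (PySem.List.pyRange 1 (v + 1) 1).foldl (fun hp level => hp + vigPointGain level) 500) := by
  induction attrs generalizing hp with
  | nil => simp [hpLoop, PySem.Dict.get?]
  | cons p rest ih =>
    obtain ⟨a, v⟩ := p
    have hv := hval _ (List.mem_cons_self ..)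
    simp only [List.map_cons, List.nodup_cons] at hnd
    simp only [hpLoop]
    rw [if_neg (by omega), if_neg (by omega)]
    rw [PySem.Dict.get?_mk_cons]
    by_cases ha : a = "vig"
    · subst ha
      simp only [beq_self_eq_true, if_true]
      rw [hpLoop_no_vig rest _ (fun q hq => hval q (List.mem_cons_of_mem _ hq)) hnd.1]
      rw [vig_sum_eq v hv.1]
    · have hne : (a == "vig") = false := by simp [ha]
      rw [hne]
      simp only [Bool.false_eq_true, if_false, calculate_other_hp, add_zero]
      exact ih hp (fun q hq => hval q (List.mem_cons_of_mem _ hq)) hnd.2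

-- ===== VERDICT (by name: the statement is the Claim_ definition above) =====
theorem calculate_hp_spec : Claim_equal_calculate_hp := by
  intro attrs _ hpre
  obtain ⟨hnd, hval⟩ := hpre
  unfold Spec_calculate_hp calculate_hp calculate_hp_alt
  rw [altValidate_true attrs hval, if_pos rfl, hpLoop_eq attrs 0 hval hnd]
  simp
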